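-- pv_equiv track=rewrite | github.com/neryos/crcr-heb-proj | scripts/decoder/candidates-suggester.py | findSharedWordsBetweenTitlesDicts
-- ===== SOURCE A (Python) =====
-- def findSharedWordsBetweenTitlesDicts(titles_dict, words):
--     sharedMweDict = []
--     if len(words) > 1:
--         if words[0] in titles_dict and words[1] in titles_dict:
--             sharedMweDict = set(titles_dict[words[0]]) & set(titles_dict[words[1]])
--             for word in words[2:]:
--                 if word in titles_dict:
--                     nextWordDict = titles_dict[word]
--                     if nextWordDict:
--                         sharedMweDict = set(sharedMweDict) & set(nextWordDict)
--     return sharedMweDict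
-- ===== SOURCE B (Python) =====
-- def findSharedWordsBetweenTitlesDicts(titles_dict, words):
--     if len(words) <= 1:
--         return []
--     if words[0] not in titles_dict or words[1] not in titles_dict:
--         return []
--     # membership filters: the second word's set plus every later word's non-empty set
--     filters = [set(titles_dict[words[1]])]
--     for w in words[2:]:
--         if w in titles_dict and titles_dict[w]:
--             filters.append(set(titles_dict[w]))
--     # keep every candidate title of the first word that passes all membership tests
--     return {t for t in set(titles_dict[words[0]]) if all(t in f for f in filters)}
-- ===== Notes on version B (the rewrite author's own statement) =====
-- stated objective: alternative
-- what changed: B never forms an intersection set: it treats the first word's title set as the candidate pool and keeps each candidate by a single all-membership test against the other relevant sets, instead of A's fold that repeatedly materialises a shrinking intersection set.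
import Mathlib
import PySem

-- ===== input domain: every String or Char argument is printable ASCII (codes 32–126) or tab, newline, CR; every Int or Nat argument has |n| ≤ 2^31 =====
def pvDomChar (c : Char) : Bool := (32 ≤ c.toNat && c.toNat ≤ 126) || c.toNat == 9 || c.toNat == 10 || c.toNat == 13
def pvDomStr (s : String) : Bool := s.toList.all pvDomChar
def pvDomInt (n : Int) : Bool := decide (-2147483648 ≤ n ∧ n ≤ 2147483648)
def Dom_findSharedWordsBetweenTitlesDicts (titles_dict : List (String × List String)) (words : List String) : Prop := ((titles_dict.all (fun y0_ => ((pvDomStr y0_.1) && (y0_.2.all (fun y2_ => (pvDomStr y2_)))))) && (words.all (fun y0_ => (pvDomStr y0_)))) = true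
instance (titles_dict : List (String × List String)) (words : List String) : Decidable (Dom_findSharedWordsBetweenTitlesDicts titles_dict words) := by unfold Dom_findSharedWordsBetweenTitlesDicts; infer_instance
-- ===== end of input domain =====

-- B never forms an intersection set: it keeps each candidate title of the first word by one
-- all-membership test against the other relevant sets, instead of A's fold that repeatedly
-- materialises a shrinking intersection set (objective: alternative).

-- ===== PORT A =====
def findSharedWordsBetweenTitlesDicts (titles_dict : List (String × List String)) (words : List String) : List String :=
  match words with
  | w0 :: w1 :: rest =>
    match PySem.Dict.get? ⟨titles_dict⟩ w0, PySem.Dict.get? ⟨titles_dict⟩ w1 with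
    | some l0, some l1 =>
      rest.foldl (fun s word =>
        match PySem.Dict.get? ⟨titles_dict⟩ word with
        | some nextWordDict =>
          if nextWordDict ≠ [] then
            PySem.Set.inter (PySem.Set.ofList s) (PySem.Set.ofList nextWordDict)
          else s
        | none => s)
        (PySem.Set.inter (PySem.Set.ofList l0) (PySem.Set.ofList l1))
    | _, _ => []
  | _ => []

-- ===== PORT B =====
def findSharedWordsBetweenTitlesDicts_alt (titles_dict : List (String × List String)) (words : List String) : List String :=
  if words.length ≤ 1 then []
  else
    let w0 := PySem.List.pyGetD words 0 ""
    let w1 := PySem.List.pyGetD words 1 ""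
    if ¬ PySem.Dict.contains (⟨titles_dict⟩ : PySem.Dict String (List String)) w0
        ∨ ¬ PySem.Dict.contains (⟨titles_dict⟩ : PySem.Dict String (List String)) w1 then []
    else
      let filters : List (PySem.Set String) :=
        (PySem.List.slice words (some 2) none).foldl (fun acc w =>
          if PySem.Dict.contains (⟨titles_dict⟩ : PySem.Dict String (List String)) w
              ∧ PySem.Dict.getD (⟨titles_dict⟩ : PySem.Dict String (List String)) w [] ≠ [] then
            acc ++ [PySem.Set.ofList (PySem.Dict.getD (⟨titles_dict⟩ : PySem.Dict String (List String)) w [])]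
          else acc)
          [PySem.Set.ofList (PySem.Dict.getD (⟨titles_dict⟩ : PySem.Dict String (List String)) w1 [])]
      (PySem.Set.ofList (PySem.Dict.getD (⟨titles_dict⟩ : PySem.Dict String (List String)) w0 [])).filter
        (fun t => filters.all (fun f => PySem.Set.contains f t))

-- ===== PRECONDITION & SPEC =====
def Spec_findSharedWordsBetweenTitlesDicts (titles_dict : List (String × List String)) (words : List String) (out : List String) : Prop := out = findSharedWordsBetweenTitlesDicts_alt titles_dict words
instance (titles_dict : List (String × List String)) (words : List String) (out : List String) : Decidable (Spec_findSharedWordsBetweenTitlesDicts titles_dict words out) := by unfold Spec_findSharedWordsBetweenTitlesDicts; infer_instance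

-- ===== CLAIM (what is proved, stated in full; the proofs are below) =====
def Claim_equal_findSharedWordsBetweenTitlesDicts : Prop := ∀ (titles_dict : List (String × List String)) (words : List String), Dom_findSharedWordsBetweenTitlesDicts titles_dict words → Spec_findSharedWordsBetweenTitlesDicts titles_dict words (findSharedWordsBetweenTitlesDicts titles_dict words)

-- ===== LEMMAS AND PROOFS =====

-- B's filter-accumulating loop, as a filterMap.
theorem pvFilters_eq (titles_dict : List (String × List String)) (rest : List String)
    (init : List (PySem.Set String)) :
    rest.foldl (fun acc w =>
        if PySem.Dict.contains (⟨titles_dict⟩ : PySem.Dict String (List String)) w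
            ∧ PySem.Dict.getD (⟨titles_dict⟩ : PySem.Dict String (List String)) w [] ≠ [] then
          acc ++ [PySem.Set.ofList (PySem.Dict.getD (⟨titles_dict⟩ : PySem.Dict String (List String)) w [])]
        else acc) init
      = init ++ rest.filterMap (fun w =>
          if PySem.Dict.contains (⟨titles_dict⟩ : PySem.Dict String (List String)) w
              ∧ PySem.Dict.getD (⟨titles_dict⟩ : PySem.Dict String (List String)) w [] ≠ [] then
            some (PySem.Set.ofList (PySem.Dict.getD (⟨titles_dict⟩ : PySem.Dict String (List String)) w []))
          else none) := by
  induction rest generalizing init with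
  | nil => simp
  | cons w ws ih =>
    simp only [List.foldl_cons, List.filterMap_cons]
    by_cases h : PySem.Dict.contains (⟨titles_dict⟩ : PySem.Dict String (List String)) w
        ∧ PySem.Dict.getD (⟨titles_dict⟩ : PySem.Dict String (List String)) w [] ≠ []
    · rw [if_pos h, if_pos h, ih]; simp
    · rw [if_neg h, if_neg h, ih]

-- A's running-intersection loop, as one filter by all-membership over the same filterMap.
theorem pvFold_eq (titles_dict : List (String × List String)) (rest : List String)
    (s : List String) (hs : s.Nodup) :
    rest.foldl (fun s word =>
        match PySem.Dict.get? (⟨titles_dict⟩ : PySem.Dict String (List String)) word with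
        | some nextWordDict =>
          if nextWordDict ≠ [] then
            PySem.Set.inter (PySem.Set.ofList s) (PySem.Set.ofList nextWordDict)
          else s
        | none => s) s
      = s.filter (fun t =>
          (rest.filterMap (fun w =>
            if PySem.Dict.contains (⟨titles_dict⟩ : PySem.Dict String (List String)) w
                ∧ PySem.Dict.getD (⟨titles_dict⟩ : PySem.Dict String (List String)) w [] ≠ [] then
              some (PySem.Set.ofList (PySem.Dict.getD (⟨titles_dict⟩ : PySem.Dict String (List String)) w []))
            else none)).all (fun f => PySem.Set.contains f t)) := by
  induction rest generalizing s with
  | nil => simp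
  | cons w ws ih =>
    simp only [List.foldl_cons, List.filterMap_cons]
    rw [PySem.Dict.contains_eq_isSome_get?]
    cases hg : PySem.Dict.get? (⟨titles_dict⟩ : PySem.Dict String (List String)) w with
    | none =>
      simp only [Option.isSome_none, Bool.false_eq_true, false_and, if_false]
      exact ih s hs
    | some l =>
      have hd : PySem.Dict.getD (⟨titles_dict⟩ : PySem.Dict String (List String)) w [] = l := by
        simp [PySem.Dict.getD, hg]
      simp only [hd, Option.isSome_some]
      by_cases hl : l ≠ []
      · rw [if_pos hl, if_pos ⟨trivial, hl⟩]
        rw [PySem.Set.ofList_eq_self_of_nodup s hs]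
        have hstep : PySem.Set.inter s (PySem.Set.ofList l)
            = s.filter (fun t => PySem.Set.contains (PySem.Set.ofList l) t) := rfl
        rw [hstep, ih _ (hs.filter _), List.filter_filter]
        apply List.filter_congr
        intro t _
        simp [Bool.and_comm]
      · rw [if_neg hl, if_neg (by simp_all)]
        exact ih s hs

-- ===== VERDICT (by name: the statement is the Claim_ definition above) =====
theorem findSharedWordsBetweenTitlesDicts_spec : Claim_equal_findSharedWordsBetweenTitlesDicts := by
  intro titles_dict words _
  unfold Spec_findSharedWordsBetweenTitlesDicts
  unfold findSharedWordsBetweenTitlesDicts findSharedWordsBetweenTitlesDicts_alt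
  match words with
  | [] => rfl
  | [_] => rfl
  | w0 :: w1 :: rest =>
    have hg0 : PySem.List.pyGetD (w0 :: w1 :: rest) 0 "" = w0 := by
      norm_num [PySem.List.pyGetD, PySem.List.pyGet?, PySem.List.pyIdx?]
      rw [if_pos (by omega)]
      rfl
    have hg1 : PySem.List.pyGetD (w0 :: w1 :: rest) 1 "" = w1 := by
      norm_num [PySem.List.pyGetD, PySem.List.pyGet?, PySem.List.pyIdx?]
    have hsl : PySem.List.slice (w0 :: w1 :: rest) (some 2) none = rest := by
      have := PySem.List.slice_from_natCast (w0 :: w1 :: rest) 2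
      simpa using this
    have hlen : ¬ (w0 :: w1 :: rest).length ≤ 1 := by simp
    simp only [hg0, hg1, hsl, if_neg hlen]
    cases h0 : PySem.Dict.get? (⟨titles_dict⟩ : PySem.Dict String (List String)) w0 with
    | none => rw [if_pos (by simp [PySem.Dict.contains_eq_isSome_get?, h0])]
    | some l0 =>
      cases h1 : PySem.Dict.get? (⟨titles_dict⟩ : PySem.Dict String (List String)) w1 with
      | none => rw [if_pos (by simp [PySem.Dict.contains_eq_isSome_get?, h1])]
      | some l1 =>
        have hd0 : PySem.Dict.getD (⟨titles_dict⟩ : PySem.Dict String (List String)) w0 [] = l0 := by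
          simp [PySem.Dict.getD, h0]
        have hd1 : PySem.Dict.getD (⟨titles_dict⟩ : PySem.Dict String (List String)) w1 [] = l1 := by
          simp [PySem.Dict.getD, h1]
        rw [if_neg (by simp [PySem.Dict.contains_eq_isSome_get?, h0, h1])]
        simp only [hd0, hd1]
        rw [pvFilters_eq]
        refine (pvFold_eq titles_dict rest _
          (((PySem.Set.nodup_ofList l0)).filter _ : (PySem.Set.inter (PySem.Set.ofList l0) (PySem.Set.ofList l1)).Nodup)).trans ?_
        rw [List.filter_filter]
        apply List.filter_congr
        intro t _
        simp [Bool.and_comm]
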